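-- pv_equiv track=rewrite | github.com/MonadKai/vllm | vllm/v1/sample/logits_processor/anti_repetition.py | _check_single_token_repetition
-- ===== SOURCE A (Python) =====
-- def _check_single_token_repetition(token_ids: list[int], threshold: int) -> bool:
--     """Check if the same token repeats at the end."""
--     if len(token_ids) < threshold:
--         return False
--
--     last_token = token_ids[-1]
--     count = 1
--
--     # Count consecutive occurrences from the end
--     for i in range(len(token_ids) - 2, -1, -1):
--         if token_ids[i] == last_token:
--             count += 1
--         else:
--             break
--
--     return count >= threshold
-- ===== SOURCE B (Python) =====
-- def _check_single_token_repetition(token_ids: list[int], threshold: int) -> bool: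
--     """Check if the same token repeats at the end."""
--     if len(token_ids) < threshold:
--         return False
--     # the trailing run has length >= threshold iff the last `threshold`
--     # tokens are all equal, i.e. the tail slice holds at most one distinct value
--     return len(set(token_ids[len(token_ids) - threshold:])) <= 1
-- ===== Notes on version B (the rewrite author's own statement) =====
-- stated objective: idiomatic
-- what changed: A scans backwards index by index counting the trailing run with an early break; B takes the last `threshold` elements as a slice and checks the slice holds at most one distinct value via set().
-- crash fix: On the empty list with threshold <= 0 A raises IndexError at token_ids[-1]; B returns True (the empty tail slice is trivially uniform). — e.g. on _check_single_token_repetition([], 0): A raises IndexError, B returns true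
import Mathlib
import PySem

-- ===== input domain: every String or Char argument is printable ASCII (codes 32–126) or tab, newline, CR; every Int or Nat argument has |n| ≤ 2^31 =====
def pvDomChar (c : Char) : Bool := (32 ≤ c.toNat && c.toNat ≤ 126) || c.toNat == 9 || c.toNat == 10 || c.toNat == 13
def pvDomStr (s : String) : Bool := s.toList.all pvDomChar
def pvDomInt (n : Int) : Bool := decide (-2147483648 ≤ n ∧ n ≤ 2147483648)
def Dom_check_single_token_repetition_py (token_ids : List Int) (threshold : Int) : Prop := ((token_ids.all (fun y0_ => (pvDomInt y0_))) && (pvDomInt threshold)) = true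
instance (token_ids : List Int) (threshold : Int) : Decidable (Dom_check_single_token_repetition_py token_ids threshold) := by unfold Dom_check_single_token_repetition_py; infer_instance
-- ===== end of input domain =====

-- B replaces A's backward index scan (with break) by a tail slice of length
-- `threshold` checked for at most one distinct value (idiomatic; return value only).

-- ===== PORT A =====
-- the backward `for i in range(len(token_ids)-2, -1, -1)` loop with its break:
-- recursion over the index list, stopping at the first mismatch
def pvALoop (token_ids : List Int) (last : Int) : List Int → Int → Int
  | [], count => count
  | i :: rest, count =>
    match PySem.List.pyGet? token_ids i with
    | some v => if v == last then pvALoop token_ids last rest (count + 1) else count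
    | none => count   -- unreachable: every index produced by the range is in bounds

def check_single_token_repetition_py (token_ids : List Int) (threshold : Int) : Bool :=
  if (token_ids.length : Int) < threshold then false
  else
    match PySem.List.pyGet? token_ids (-1) with
    | none => false   -- Python raises IndexError here; excluded by Pre_
    | some last =>
      decide (threshold ≤ pvALoop token_ids last (PySem.List.pyRange ((token_ids.length : Int) - 2) (-1) (-1)) 1)

-- ===== PORT B =====
def check_single_token_repetition_py_alt (token_ids : List Int) (threshold : Int) : Bool :=
  if (token_ids.length : Int) < threshold then false
  else
    decide ((PySem.Set.ofList (PySem.List.slice token_ids (some ((token_ids.length : Int) - threshold)) none)).length ≤ 1)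

-- ===== PRECONDITION & SPEC =====
-- Pre_ excludes exactly the inputs where A raises IndexError (empty list with threshold ≤ 0)
def Pre_check_single_token_repetition_py (token_ids : List Int) (threshold : Int) : Prop :=
  token_ids ≠ [] ∨ 0 < threshold
instance (token_ids : List Int) (threshold : Int) : Decidable (Pre_check_single_token_repetition_py token_ids threshold) := by unfold Pre_check_single_token_repetition_py; infer_instance

def pvWitness_check_single_token_repetition_py : List Int × Int := ([5, 5, 5], 3)

-- On the empty list with threshold <= 0 A raises IndexError at token_ids[-1]; B returns True (the empty tail slice is trivially uniform).
def Raises_check_single_token_repetition_py (token_ids : List Int) (threshold : Int) : Prop :=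
  token_ids = [] ∧ threshold ≤ 0
instance (token_ids : List Int) (threshold : Int) : Decidable (Raises_check_single_token_repetition_py token_ids threshold) := by unfold Raises_check_single_token_repetition_py; infer_instance
def pvRaiseWitness_check_single_token_repetition_py : List Int × Int := ([], 0)
def pvRaiseWitnessOut_check_single_token_repetition_py : Bool := true

def Spec_check_single_token_repetition_py (token_ids : List Int) (threshold : Int) (out : Bool) : Prop := out = check_single_token_repetition_py_alt token_ids threshold
instance (token_ids : List Int) (threshold : Int) (out : Bool) : Decidable (Spec_check_single_token_repetition_py token_ids threshold out) := by unfold Spec_check_single_token_repetition_py; infer_instance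

-- ===== CLAIM (what is proved, stated in full; the proofs are below) =====
def Claim_equal_check_single_token_repetition_py : Prop := ∀ (token_ids : List Int) (threshold : Int), Dom_check_single_token_repetition_py token_ids threshold → Pre_check_single_token_repetition_py token_ids threshold → Spec_check_single_token_repetition_py token_ids threshold (check_single_token_repetition_py token_ids threshold)

def Claim_raises_check_single_token_repetition_py : Prop := (∀ (token_ids : List Int) (threshold : Int), Dom_check_single_token_repetition_py token_ids threshold → Raises_check_single_token_repetition_py token_ids threshold → ¬ Pre_check_single_token_repetition_py token_ids threshold) ∧ (Dom_check_single_token_repetition_py (pvRaiseWitness_check_single_token_repetition_py.1) (pvRaiseWitness_check_single_token_repetition_py.2) ∧ Raises_check_single_token_repetition_py (pvRaiseWitness_check_single_token_repetition_py.1) (pvRaiseWitness_check_single_token_repetition_py.2) ∧ check_single_token_repetition_py_alt (pvRaiseWitness_check_single_token_repetition_py.1) (pvRaiseWitness_check_single_token_repetition_py.2) = pvRaiseWitnessOut_check_single_token_repetition_py)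

-- ===== LEMMAS AND PROOFS =====

-- A's loop over range(k-1, -1, -1) counts the leading run of `last` in (take k).reverse
theorem pvALoop_spec (tids : List Int) (last : Int) :
    ∀ (k : Nat), k ≤ tids.length → ∀ (c : Int),
      pvALoop tids last (PySem.List.pyRange ((k : Int) - 1) (-1) (-1)) c
        = c + (((tids.take k).reverse.takeWhile (fun x => x == last)).length : Int) := by
  intro k
  induction k with
  | zero =>
    intro _ c
    rw [PySem.List.pyRange_neg_one_eq_nil (by omega)]
    simp [pvALoop]
  | succ k ih =>
    intro hk c
    have hklt : k < tids.length := by omega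
    have hcast : ((k + 1 : Nat) : Int) - 1 = (k : Int) := by push_cast; ring
    rw [hcast, PySem.List.pyRange_neg_one_cons (by omega)]
    have hget : PySem.List.pyGet? tids (k : Int) = some (tids[k]'hklt) := by
      simp [PySem.List.pyGet?, PySem.List.pyIdx?, hklt]
    have htake : tids.take (k + 1) = tids.take k ++ [tids[k]'hklt] := by
      rw [List.take_add_one]
      simp [List.getElem?_eq_getElem hklt]
    show pvALoop tids last ((k : Int) :: PySem.List.pyRange ((k : Int) - 1) (-1) (-1)) c = _
    rw [pvALoop, hget]
    by_cases h : tids[k]'hklt = last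
    · simp only [h, beq_self_eq_true, if_true]
      rw [ih (by omega) (c + 1), htake]
      simp [h]
      ring
    · simp only [beq_iff_eq, h, if_false]
      rw [htake]
      simp
      intro _
      simpa [Nat.min_eq_left hk] using h

-- at most one distinct value iff all elements pairwise equal
theorem pvSet_len_le_one (l : List Int) :
    ((PySem.Set.ofList l).length ≤ 1) ↔ ∀ x ∈ l, ∀ y ∈ l, x = y := by
  have hnd := PySem.Set.nodup_ofList l
  have hm := PySem.Set.mem_ofList l
  rcases hsl : PySem.Set.ofList l with _ | ⟨a, _ | ⟨b, t⟩⟩ <;> rw [hsl] at hnd hm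
  · constructor
    · intro _ x hx
      exact absurd ((hm x).2 hx) (List.not_mem_nil)
    · intro _; simp
  · constructor
    · intro _ x hx y hy
      have hx' := (hm x).1 ∘ (hm x).2
      have : x = a := by simpa using (hm x).2 hx
      have : y = a := by simpa using (hm y).2 hy
      omega
    · intro _; simp
  · constructor
    · intro hlen
      simp at hlen
    · intro h
      have ha : a ∈ l := (hm a).1 (by simp)
      have hb : b ∈ l := (hm b).1 (by simp)
      have : a = b := h a ha b hb
      simp [this] at hnd

-- all of the first m elements equal a iff the leading a-run has length ≥ m
theorem pvTakeWhile_run (a : Int) :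
    ∀ (l : List Int) (m : Nat), m ≤ l.length →
      ((∀ x ∈ l.take m, x = a) ↔ m ≤ (l.takeWhile (fun x => x == a)).length) := by
  intro l
  induction l with
  | nil =>
    intro m hm
    have : m = 0 := by simpa using hm
    simp [this]
  | cons hd tl ih =>
    intro m hm
    cases m with
    | zero => simp
    | succ m' =>
      have hm' : m' ≤ tl.length := by simpa using hm
      by_cases h : hd = a
      · simp [h, ih m' hm']
      · simp [h]

-- ===== VERDICT (by name: the statement is the Claim_ definition above) =====
theorem check_single_token_repetition_py_raises : Claim_raises_check_single_token_repetition_py := by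
  unfold Claim_raises_check_single_token_repetition_py
  constructor
  · rintro tids thr _ ⟨h1, h2⟩ hpre
    rcases hpre with h | h
    · exact h h1
    · omega
  · decide

theorem check_single_token_repetition_py_spec : Claim_equal_check_single_token_repetition_py := by
  intro tids thr hdom hpre
  unfold Spec_check_single_token_repetition_py check_single_token_repetition_py check_single_token_repetition_py_alt
  by_cases hlt : (tids.length : Int) < thr
  · simp [hlt]
  · have hle : thr ≤ (tids.length : Int) := by omega
    by_cases hnil : tids = []
    · -- excluded: A raises here (see check_single_token_repetition_py_raises)
      exact absurd hpre (check_single_token_repetition_py_raises.1 tids thr hdom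
        ⟨hnil, by subst hnil; simpa using hle⟩)
    · have hn : 1 ≤ tids.length := List.length_pos_of_ne_nil hnil
      have hget : PySem.List.pyGet? tids (-1) = some (tids.getLast hnil) := by
        rw [List.getLast_eq_getElem]
        simp [PySem.List.pyGet?, PySem.List.pyIdx?, hn,
          List.getElem?_eq_getElem (show tids.length - 1 < tids.length by omega)]
      rw [if_neg hlt, if_neg hlt, hget]
      set last := tids.getLast hnil with hlast
      show decide (thr ≤ pvALoop tids last (PySem.List.pyRange ((tids.length : Int) - 2) (-1) (-1)) 1) = _
      have hA := pvALoop_spec tids last (tids.length - 1) (by omega) 1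
      rw [show (tids.length : Int) - 2 = ((tids.length - 1 : Nat) : Int) - 1 by omega, hA]
      set T := ((tids.take (tids.length - 1)).reverse.takeWhile (fun x => x == last)).length with hT
      by_cases hpos : 0 < thr
      · -- 0 < thr ≤ len
        have h0 : 0 ≤ (tids.length : Int) - thr := by omega
        rw [PySem.List.slice_from _ h0]
        set m := thr.toNat with hm
        have hdropnat : ((tids.length : Int) - thr).toNat = tids.length - m := by omega
        rw [hdropnat, decide_eq_decide, pvSet_len_le_one]
        have hmem : ∀ x, x ∈ tids.drop (tids.length - m) ↔ x ∈ tids.reverse.take m := by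
          intro x
          rw [← List.mem_reverse (as := tids.drop (tids.length - m)), List.reverse_drop,
            show tids.length - (tids.length - m) = m by omega]
        have hrev : tids.reverse = last :: (tids.take (tids.length - 1)).reverse := by
          conv_lhs => rw [← List.dropLast_append_getLast hnil]
          rw [List.reverse_append]
          simp [List.dropLast_eq_take, hlast]
        rw [hrev] at hmem
        set rest := (tids.take (tids.length - 1)).reverse with hrest
        have htakem : (last :: rest).take m = last :: rest.take (m - 1) := by
          obtain ⟨k, hk⟩ : ∃ k, m = k + 1 := ⟨m - 1, by omega⟩
          rw [hk]
          simp
        rw [htakem] at hmem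
        have hrestlen : rest.length = tids.length - 1 := by
          simp [hrest]
        have hrun := pvTakeWhile_run last rest (m - 1) (by omega)
        constructor
        · intro hineq x hx y hy
          have hall : ∀ z ∈ rest.take (m - 1), z = last := hrun.2 (by omega)
          have key : ∀ z ∈ tids.drop (tids.length - m), z = last := by
            intro z hz
            rcases List.mem_cons.1 ((hmem z).1 hz) with h | h
            · exact h
            · exact hall z h
          rw [key x hx, key y hy]
        · intro hall
          have hsub : ∀ z ∈ rest.take (m - 1), z = last := by
            intro z hz
            exact hall z ((hmem z).2 (List.mem_cons_of_mem _ hz)) last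
              ((hmem last).2 (List.mem_cons_self))
          have := hrun.1 hsub
          omega
      · -- thr ≤ 0 : both sides true
        have h0 : 0 ≤ (tids.length : Int) - thr := by omega
        rw [PySem.List.slice_from _ h0]
        rw [List.drop_eq_nil_of_le (by omega : tids.length ≤ ((tids.length : Int) - thr).toNat)]
        simp [PySem.Set.ofList]
        omega
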